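-- pv_equiv track=rewrite | github.com/MatsukSket/AOIS | lab2_truth_table/src/minimization.py | get_grid_cells
-- ===== SOURCE A (Python) =====
-- def get_grid_cells(row_codes: list, col_codes: list, r_start: int, c_start: int, h: int, w: int) -> list:
--     """Собирает ячейки прямоугольника размером h на w."""
--     R = len(row_codes)
--     C = len(col_codes)
--     cells = []
--
--     for i in range(h):
--         for j in range(w):
--             r = (r_start + i) % R
--             c = (c_start + j) % C
--             cells.append(row_codes[r] + col_codes[c])
--
--     return cells
-- ===== SOURCE B (Python) =====
-- def get_grid_cells(row_codes: list, col_codes: list, r_start: int, c_start: int, h: int, w: int) -> list: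
--     """Собирает ячейки прямоугольника размером h на w."""
--     if h <= 0 or w <= 0:
--         return []
--     R = len(row_codes)
--     C = len(col_codes)
--     # rotate-and-tile: build the column sequence once by slicing + list repetition
--     c0 = c_start % C
--     cols = ((col_codes[c0:] + col_codes[:c0]) * ((w + C - 1) // C))[:w]
--     # build each DISTINCT row's block of w cells once, then tile the blocks
--     r0 = r_start % R
--     base_rows = (row_codes[r0:] + row_codes[:r0])[:h]
--     base_blocks = [[r + c for c in cols] for r in base_rows]
--     cells = []
--     for blk in (base_blocks * ((h + R - 1) // R))[:h]:
--         cells += blk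
--     return cells
-- ===== Notes on version B (the rewrite author's own statement) =====
-- stated objective: alternative
-- what changed: B replaces A's per-cell modular double loop by a rotate-and-tile scheme: the wrapped column sequence is built once by slicing plus list repetition, one block of w cells is built per distinct selected row, and the blocks are tiled by list repetition and truncated to h rows.
import Mathlib
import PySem

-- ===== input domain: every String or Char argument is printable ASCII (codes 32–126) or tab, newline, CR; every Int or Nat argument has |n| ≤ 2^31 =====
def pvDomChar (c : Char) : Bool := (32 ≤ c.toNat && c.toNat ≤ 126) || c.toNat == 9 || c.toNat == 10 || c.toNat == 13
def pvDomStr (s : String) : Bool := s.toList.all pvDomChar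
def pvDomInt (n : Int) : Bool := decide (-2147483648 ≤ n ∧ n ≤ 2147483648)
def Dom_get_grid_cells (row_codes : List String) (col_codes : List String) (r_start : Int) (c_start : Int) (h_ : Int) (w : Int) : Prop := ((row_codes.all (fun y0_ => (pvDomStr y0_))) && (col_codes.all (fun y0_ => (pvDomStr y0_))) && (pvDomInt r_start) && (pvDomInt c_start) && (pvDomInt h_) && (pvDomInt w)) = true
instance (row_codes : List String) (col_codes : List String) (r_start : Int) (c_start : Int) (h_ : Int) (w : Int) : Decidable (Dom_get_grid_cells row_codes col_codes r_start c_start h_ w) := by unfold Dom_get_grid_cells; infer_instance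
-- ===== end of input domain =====

-- B replaces the per-cell modular double loop by a rotate-and-tile scheme (slices + list
-- repetition, each distinct row's block built once): an alternative decomposition.
-- ===== PORT A =====
-- Fused double loop: per cell, both modular indices are recomputed and the cell appended.
def get_grid_cells (row_codes : List String) (col_codes : List String) (r_start : Int) (c_start : Int) (h_ : Int) (w : Int) : List String :=
  let R : Int := row_codes.length
  let C : Int := col_codes.length
  (PySem.List.pyRange 0 h_ 1).foldl (fun cells i =>
    (PySem.List.pyRange 0 w 1).foldl (fun cells j =>
      let r := PySem.Int.mod (r_start + i) R
      let c := PySem.Int.mod (c_start + j) C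
      cells ++ [PySem.List.pyGetD row_codes r "" ++ PySem.List.pyGetD col_codes c ""]) cells) []

-- ===== PORT B =====
-- B: rotate-and-tile — wrapped column sequence by slicing + repetition, one block of w cells
-- per distinct selected row, blocks tiled and truncated to h rows, then concatenated.
def get_grid_cells_alt (row_codes : List String) (col_codes : List String) (r_start : Int) (c_start : Int) (h_ : Int) (w : Int) : List String :=
  if h_ ≤ 0 ∨ w ≤ 0 then []
  else
    let R : Int := row_codes.length
    let C : Int := col_codes.length
    let c0 := PySem.Int.mod c_start C
    let cols := PySem.List.slice
      (PySem.List.pyRepeat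
        (PySem.List.slice col_codes (some c0) none ++ PySem.List.slice col_codes none (some c0))
        (PySem.Int.floordiv (w + C - 1) C)) none (some w)
    let r0 := PySem.Int.mod r_start R
    let base_rows := PySem.List.slice
      (PySem.List.slice row_codes (some r0) none ++ PySem.List.slice row_codes none (some r0))
      none (some h_)
    let base_blocks := base_rows.map (fun r => cols.map (fun c => r ++ c))
    (PySem.List.slice (PySem.List.pyRepeat base_blocks (PySem.Int.floordiv (h_ + R - 1) R))
        none (some h_)).foldl (fun cells blk => cells ++ blk) []

-- ===== PRECONDITION & SPEC =====
-- Pre_ excludes exactly the inputs on which Python A raises ZeroDivisionError: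
-- h > 0 and w > 0 with an empty row_codes or col_codes list (modulo by zero); B raises there too.
def Pre_get_grid_cells (row_codes : List String) (col_codes : List String) (r_start : Int) (c_start : Int) (h_ : Int) (w : Int) : Prop :=
  h_ ≤ 0 ∨ w ≤ 0 ∨ (row_codes ≠ [] ∧ col_codes ≠ [])
instance (row_codes : List String) (col_codes : List String) (r_start : Int) (c_start : Int) (h_ : Int) (w : Int) : Decidable (Pre_get_grid_cells row_codes col_codes r_start c_start h_ w) := by unfold Pre_get_grid_cells; infer_instance
def pvWitness_get_grid_cells : List String × List String × Int × Int × Int × Int := (["a", "b"], ["x"], 1, -1, 3, 2)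
def Spec_get_grid_cells (row_codes : List String) (col_codes : List String) (r_start : Int) (c_start : Int) (h_ : Int) (w : Int) (out : List String) : Prop := out = get_grid_cells_alt row_codes col_codes r_start c_start h_ w
instance (row_codes : List String) (col_codes : List String) (r_start : Int) (c_start : Int) (h_ : Int) (w : Int) (out : List String) : Decidable (Spec_get_grid_cells row_codes col_codes r_start c_start h_ w out) := by unfold Spec_get_grid_cells; infer_instance

-- ===== CLAIM (what is proved, stated in full; the proofs are below) =====
def Claim_equal_get_grid_cells : Prop := ∀ (row_codes : List String) (col_codes : List String) (r_start : Int) (c_start : Int) (h_ : Int) (w : Int), Dom_get_grid_cells row_codes col_codes r_start c_start h_ w → Pre_get_grid_cells row_codes col_codes r_start c_start h_ w → Spec_get_grid_cells row_codes col_codes r_start c_start h_ w (get_grid_cells row_codes col_codes r_start c_start h_ w)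

-- ===== LEMMAS AND PROOFS =====

theorem pv_length_flatten_replicate {α : Type} (l : List α) (q : Nat) :
    ((List.replicate q l).flatten).length = q * l.length := by
  simp [List.length_flatten, Function.comp]

theorem pv_getElem_flatten_replicate {α : Type} (l : List α) (hl : 0 < l.length) (q k : Nat)
    (h : k < ((List.replicate q l).flatten).length) :
    ((List.replicate q l).flatten)[k] = l[k % l.length]'(Nat.mod_lt k hl) := by
  induction q generalizing k with
  | zero => simp at h
  | succ q ih =>
    rw [List.getElem_of_eq (by simp [List.replicate_succ] : (List.replicate (q+1) l).flatten = l ++ (List.replicate q l).flatten)]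
    rw [List.getElem_append]
    split
    · next hk =>
      have : k % l.length = k := Nat.mod_eq_of_lt hk
      simp [this]
    · next hk =>
      push_neg at hk
      have h' : k - l.length < ((List.replicate q l).flatten).length := by
        rw [pv_length_flatten_replicate] at h ⊢
        rw [Nat.succ_mul] at h
        omega
      rw [ih (k - l.length) h']
      have : (k - l.length) % l.length = k % l.length := by
        conv_rhs => rw [Nat.mod_eq_sub_mod hk]
      simp [this]

theorem pv_pyRepeat_map {α β : Type} (f : α → β) (l : List α) (q : Int) :
    PySem.List.pyRepeat (l.map f) q = (PySem.List.pyRepeat l q).map f := by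
  simp [PySem.List.pyRepeat, List.map_flatten, List.map_replicate]

-- tiling then truncating is unaffected by truncating the base first (q ≥ 1)
theorem pv_take_pyRepeat_take {α : Type} (l : List α) (h0 : Nat) (q : Int) (hq : 1 ≤ q) :
    (PySem.List.pyRepeat (l.take h0) q).take h0 = (PySem.List.pyRepeat l q).take h0 := by
  obtain ⟨q', hq'⟩ : ∃ q', q.toNat = q' + 1 := ⟨q.toNat - 1, by omega⟩
  by_cases hle : h0 ≤ l.length
  · have h1 : l.take h0 <+: PySem.List.pyRepeat (l.take h0) q := by
      simp [PySem.List.pyRepeat, hq', List.replicate_succ, List.flatten_cons]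
    have h2 : l <+: PySem.List.pyRepeat l q := by
      simp [PySem.List.pyRepeat, hq', List.replicate_succ, List.flatten_cons]
    obtain ⟨t1, ht1⟩ := h1
    obtain ⟨t2, ht2⟩ := h2
    rw [← ht1, ← ht2, List.take_append, List.take_append]
    simp [List.take_take, List.length_take, Nat.min_eq_left hle, Nat.sub_eq_zero_of_le hle]
  · rw [show l.take h0 = l from List.take_of_length_le (by omega)]

-- the rotate-and-tile sequence equals the modular-index sequence
theorem pv_tile_eq {α : Type} (xs : List α) (d : α) (s n : Int) (hx : xs ≠ []) (hn : 0 < n) :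
    (PySem.List.pyRepeat
      (xs.drop (PySem.Int.mod s xs.length).toNat ++ xs.take (PySem.Int.mod s xs.length).toNat)
      (PySem.Int.floordiv (n + xs.length - 1) xs.length)).take n.toNat
    = (PySem.List.pyRange 0 n 1).map (fun i => PySem.List.pyGetD xs (PySem.Int.mod (s + i) xs.length) d) := by
  have hL : 0 < xs.length := List.length_pos_iff.mpr hx
  have hLpos : (0 : Int) < (xs.length : Int) := by exact_mod_cast hL
  set L : Nat := xs.length with hLdef
  set m0 : Nat := (PySem.Int.mod s L).toNat with hm0def
  have hm_nonneg : 0 ≤ PySem.Int.mod s (L : Int) := PySem.Int.mod_nonneg s hLpos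
  have hm_lt : PySem.Int.mod s (L : Int) < L := PySem.Int.mod_lt s hLpos
  have hm0L : m0 < L := by omega
  have hmcast : PySem.Int.mod s (L : Int) = (m0 : Int) := by omega
  set rot : List α := xs.drop m0 ++ xs.take m0 with hrotdef
  have hrotlen : rot.length = L := by simp [hrotdef]; omega
  set q : Int := PySem.Int.floordiv (n + L - 1) L with hqdef
  have hqspec : q * L ≤ n + L - 1 ∧ n + L - 1 < (q + 1) * L :=
    (PySem.Int.floordiv_eq_iff_of_pos hLpos).mp hqdef.symm
  have hnq : n ≤ q * L := by
    have h2 := hqspec.2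
    rw [add_mul, one_mul] at h2
    omega
  have hq1 : 1 ≤ q := by nlinarith [hqspec.1, hnq]
  have hqL : n.toNat ≤ q.toNat * L := by
    have : ((q.toNat * L : Nat) : Int) = q * L := by
      push_cast; rw [Int.toNat_of_nonneg (by omega)]
    omega
  have hidx : ∀ k : Nat, PySem.Int.mod (s + (k : Int)) (L : Int) = (((m0 + k) % L : Nat) : Int) := by
    intro k
    rw [PySem.Int.mod_eq_emod_of_pos hLpos]
    have hs : s % (L : Int) = (m0 : Int) := by
      rw [← PySem.Int.mod_eq_emod_of_pos hLpos]; exact hmcast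
    rw [Int.add_emod, hs, ← Int.natCast_mod, ← Nat.cast_add, ← Int.natCast_mod]
    congr 1
    exact Nat.add_mod_mod m0 k L
  have hlenrep : (PySem.List.pyRepeat rot q).length = q.toNat * L := by
    simp only [PySem.List.pyRepeat]
    rw [pv_length_flatten_replicate, hrotlen]
  apply List.ext_getElem
  · rw [List.length_take, hlenrep, List.length_map, PySem.List.length_pyRange_one]
    omega
  · intro k hk1 hk2
    have hkn : k < n.toNat := by
      rw [List.length_map, PySem.List.length_pyRange_one] at hk2; omega
    rw [List.getElem_take]
    have hkrep : k < ((List.replicate q.toNat rot).flatten).length := by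
      rw [pv_length_flatten_replicate, hrotlen]; omega
    have hrepeq : PySem.List.pyRepeat rot q = (List.replicate q.toNat rot).flatten := rfl
    rw [List.getElem_of_eq hrepeq,
        pv_getElem_flatten_replicate rot (by omega) q.toNat k hkrep]
    rw [List.getElem_map, PySem.List.getElem_pyRange_one, zero_add]
    rw [hidx k, PySem.List.pyGetD_natCast]
    rw [List.getD_eq_getElem xs d (by rw [← hLdef]; exact Nat.mod_lt _ (by omega))]
    -- compare rot[k % L] with xs[(m0 + k) % L]
    have hrotget : ∀ (j : Nat) (hjL : j < L),
        (List.drop m0 xs ++ List.take m0 xs)[j]'(by simp; omega) = xs[(m0 + j) % L]'(Nat.mod_lt _ (by omega)) := by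
      intro j hjL
      rw [List.getElem_append]
      split
      · next hjd =>
        rw [List.getElem_drop]
        have hlt : m0 + j < L := by simp [List.length_drop] at hjd; omega
        have : (m0 + j) % L = m0 + j := Nat.mod_eq_of_lt hlt
        simp [this]
      · next hjd =>
        push_neg at hjd
        rw [List.getElem_take]
        have hge : L ≤ m0 + j := by simp [List.length_drop] at hjd; omega
        have : (m0 + j) % L = j - (L - m0) := by
          rw [Nat.mod_eq_sub_mod hge, Nat.mod_eq_of_lt (by omega)]
          omega
        simp only [this]
        simp only [List.length_drop, hLdef]
    simp only [hrotlen]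
    rw [List.getElem_of_eq hrotdef, hrotget (k % L) (Nat.mod_lt _ (by omega))]
    simp only [Nat.add_mod_mod]

theorem get_grid_cells_eq (row_codes : List String) (col_codes : List String) (r_start : Int) (c_start : Int) (h_ : Int) (w : Int)
    (hpre : Pre_get_grid_cells row_codes col_codes r_start c_start h_ w) :
    get_grid_cells row_codes col_codes r_start c_start h_ w = get_grid_cells_alt row_codes col_codes r_start c_start h_ w := by
  unfold get_grid_cells get_grid_cells_alt
  by_cases hz : h_ ≤ 0 ∨ w ≤ 0
  · rcases hz with hz | hz
    · simp [PySem.List.pyRange_one_eq_nil (by omega : h_ ≤ 0), hz]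
    · simp [PySem.List.pyRange_one_eq_nil (by omega : w ≤ 0), hz, List.foldl_fixed]
  · push_neg at hz
    obtain ⟨hh, hw⟩ := hz
    rcases hpre with hp | hp | ⟨hrow, hcol⟩
    · omega
    · omega
    rw [if_neg (by omega)]
    dsimp only
    have hRpos : (0 : Int) < (row_codes.length : Int) := by
      have := List.length_pos_iff.mpr hrow; exact_mod_cast this
    have hCpos : (0 : Int) < (col_codes.length : Int) := by
      have := List.length_pos_iff.mpr hcol; exact_mod_cast this
    -- rewrite B's slices into drop/take form and apply the tiling lemma
    rw [PySem.List.slice_from col_codes (PySem.Int.mod_nonneg c_start hCpos),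
        PySem.List.slice_to col_codes (PySem.Int.mod_nonneg c_start hCpos),
        PySem.List.slice_to _ (by omega : (0:Int) ≤ w),
        PySem.List.slice_from row_codes (PySem.Int.mod_nonneg r_start hRpos),
        PySem.List.slice_to row_codes (PySem.Int.mod_nonneg r_start hRpos),
        PySem.List.slice_to _ (by omega : (0:Int) ≤ h_),
        PySem.List.slice_to _ (by omega : (0:Int) ≤ h_)]
    rw [pv_tile_eq col_codes "" c_start w hcol (by omega)]
    have hq1 : 1 ≤ PySem.Int.floordiv (h_ + row_codes.length - 1) row_codes.length := by
      have := (PySem.Int.floordiv_eq_iff_of_pos (q := PySem.Int.floordiv (h_ + row_codes.length - 1) row_codes.length) hRpos).mp rfl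
      nlinarith [this.1, this.2]
    rw [List.map_take, pv_take_pyRepeat_take _ _ _ hq1, pv_pyRepeat_map, ← List.map_take,
        pv_tile_eq row_codes "" r_start h_ hrow (by omega)]
    rw [PySem.List.foldl_append_eq_flatMap (fun x => x)]
    rw [List.flatMap_map, List.nil_append]
    -- A's fused double loop flattened to the same canonical form
    have inner : ∀ (i : Int),
        (PySem.List.pyRange 0 w 1).foldl (fun cells j =>
          cells ++ [PySem.List.pyGetD row_codes (PySem.Int.mod (r_start + i) row_codes.length) "" ++
                    PySem.List.pyGetD col_codes (PySem.Int.mod (c_start + j) col_codes.length) ""]) []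
        = ((PySem.List.pyRange 0 w 1).map
            (fun j => PySem.List.pyGetD col_codes (PySem.Int.mod (c_start + j) col_codes.length) "")).map
            (fun c => PySem.List.pyGetD row_codes (PySem.Int.mod (r_start + i) row_codes.length) "" ++ c) := by
      intro i
      rw [PySem.List.foldl_append_singleton_eq_map]
      simp [List.map_map, Function.comp]
    calc (PySem.List.pyRange 0 h_ 1).foldl (fun cells i =>
          (PySem.List.pyRange 0 w 1).foldl (fun cells j =>
            cells ++ [PySem.List.pyGetD row_codes (PySem.Int.mod (r_start + i) row_codes.length) "" ++
                      PySem.List.pyGetD col_codes (PySem.Int.mod (c_start + j) col_codes.length) ""]) cells) []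
        = (PySem.List.pyRange 0 h_ 1).foldl (fun cells i => cells ++
            ((PySem.List.pyRange 0 w 1).map
              (fun j => PySem.List.pyGetD col_codes (PySem.Int.mod (c_start + j) col_codes.length) "")).map
              (fun c => PySem.List.pyGetD row_codes (PySem.Int.mod (r_start + i) row_codes.length) "" ++ c)) [] := by
          apply PySem.List.foldl_congr_mem
          intro cells i _
          rw [PySem.List.foldl_append_singleton_eq_map, ← inner i,
              PySem.List.foldl_append_singleton_eq_map]
          simp
      _ = _ := by
          rw [PySem.List.foldl_append_eq_flatMap]
          simp [List.flatMap_map]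

-- ===== VERDICT (by name: the statement is the Claim_ definition above) =====
theorem get_grid_cells_spec : Claim_equal_get_grid_cells := by
  intro row_codes col_codes r_start c_start h_ w _ hpre
  unfold Spec_get_grid_cells
  exact get_grid_cells_eq row_codes col_codes r_start c_start h_ w hpre
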